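-- pv_equiv track=rewrite | github.com/Kapil-Pathak/ABSA-from-unstructured-reviews | zs.py | get_cluster_names_map
-- ===== SOURCE A (Python) =====
-- from collections import defaultdict
--
-- def get_cluster_names_map(asp_to_cluster_map, aspect_freq_map):
--     cluster_id_to_name_map = defaultdict()
--     clusters = set(asp_to_cluster_map.values())
--     for i in clusters:
--         this_cluster_asp = [k for k,v in asp_to_cluster_map.items() if v == i]
--         filt_freq_map = {k:v for k,v in aspect_freq_map.items() if k in this_cluster_asp}
--         filt_freq_map = sorted(filt_freq_map.items(), key = lambda x: x[1], reverse = True)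
--         cluster_id_to_name_map[i] = filt_freq_map
--     return cluster_id_to_name_map
-- ===== SOURCE B (Python) =====
-- def get_cluster_names_map(asp_to_cluster_map, aspect_freq_map):
--     # one pass: pre-create a bucket per cluster id, route each freq entry to its
--     # cluster by a single dict lookup, then sort each bucket once
--     buckets = {cid: [] for cid in asp_to_cluster_map.values()}
--     for asp, freq in aspect_freq_map.items():
--         cid = asp_to_cluster_map.get(asp)
--         if cid is not None:
--             buckets[cid].append((asp, freq))
--     return {cid: sorted(lst, key=lambda x: x[1], reverse=True)
--             for cid, lst in buckets.items()}
-- ===== Notes on version B (the rewrite author's own statement) =====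
-- stated objective: faster
-- what changed: Instead of rescanning both dicts once per cluster id (rebuilding the cluster's aspect list and filtering the frequency map by list membership), B pre-creates one bucket per cluster and routes each frequency entry to its bucket in a single pass via a dict lookup, then sorts each bucket; the returned dicts are equal up to key order.
import Mathlib
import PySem

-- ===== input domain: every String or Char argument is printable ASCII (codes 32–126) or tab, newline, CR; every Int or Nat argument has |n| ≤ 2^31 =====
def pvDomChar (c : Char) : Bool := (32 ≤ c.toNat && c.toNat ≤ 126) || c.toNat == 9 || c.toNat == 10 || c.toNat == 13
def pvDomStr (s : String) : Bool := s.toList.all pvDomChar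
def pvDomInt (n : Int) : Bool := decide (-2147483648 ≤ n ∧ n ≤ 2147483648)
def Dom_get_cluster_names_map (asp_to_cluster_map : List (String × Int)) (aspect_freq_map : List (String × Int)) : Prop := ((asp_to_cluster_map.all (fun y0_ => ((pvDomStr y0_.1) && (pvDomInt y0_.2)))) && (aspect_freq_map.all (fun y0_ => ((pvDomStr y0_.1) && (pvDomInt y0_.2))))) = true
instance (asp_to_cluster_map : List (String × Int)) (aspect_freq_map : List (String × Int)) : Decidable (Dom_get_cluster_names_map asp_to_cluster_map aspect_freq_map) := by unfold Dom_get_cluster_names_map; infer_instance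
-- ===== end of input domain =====

-- B groups all frequency entries into per-cluster buckets in ONE pass over aspect_freq_map
-- (dict lookup per aspect) instead of A's per-cluster rescan of both dicts, then sorts each
-- bucket; the two dicts are equal up to key order, which is how dict outputs are compared
-- (in Lean both ports list the clusters in first-occurrence order of asp_to_cluster_map's values).

-- ===== PORT A =====
-- value computed by A's loop body for one cluster id i
def pvAval (d1 d2 : PySem.Dict String Int) (i : Int) : List (String × Int) :=
  let this_cluster_asp := (d1.items.filter (fun kv => kv.2 == i)).map (fun kv => kv.1)
  let filt_freq_map := PySem.Dict.ofList (d2.items.filter (fun kv => this_cluster_asp.contains kv.1))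
  PySem.List.sorted filt_freq_map.items (fun x => x.2) true

def get_cluster_names_map (asp_to_cluster_map : List (String × Int)) (aspect_freq_map : List (String × Int)) : List (Int × List (String × Int)) :=
  let d1 : PySem.Dict String Int := PySem.Dict.ofList asp_to_cluster_map
  let d2 : PySem.Dict String Int := PySem.Dict.ofList aspect_freq_map
  let clusters : PySem.Set Int := PySem.Set.ofList d1.values
  (clusters.foldl (fun (acc : PySem.Dict Int (List (String × Int))) i =>
      acc.insert i (pvAval d1 d2 i)) PySem.Dict.empty).items

-- ===== PORT B =====
-- one step of B's grouping pass: route one (aspect, freq) pair to its cluster's bucket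
def pvBstep (d1 : PySem.Dict String Int) (acc : PySem.Dict Int (List (String × Int))) (p : String × Int) : PySem.Dict Int (List (String × Int)) :=
  match d1.get? p.1 with
  | some cid => acc.modify cid [] (fun l => l ++ [p])
  | none => acc

def get_cluster_names_map_alt (asp_to_cluster_map : List (String × Int)) (aspect_freq_map : List (String × Int)) : List (Int × List (String × Int)) :=
  let d1 : PySem.Dict String Int := PySem.Dict.ofList asp_to_cluster_map
  let d2 : PySem.Dict String Int := PySem.Dict.ofList aspect_freq_map
  let buckets0 : PySem.Dict Int (List (String × Int)) := PySem.Dict.ofList (d1.values.map (fun cid => (cid, [])))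
  let buckets := d2.items.foldl (pvBstep d1) buckets0
  buckets.items.map (fun q => (q.1, PySem.List.sorted q.2 (fun x => x.2) true))

-- ===== PRECONDITION & SPEC =====
def Spec_get_cluster_names_map (asp_to_cluster_map : List (String × Int)) (aspect_freq_map : List (String × Int)) (out : List (Int × List (String × Int))) : Prop := out = get_cluster_names_map_alt asp_to_cluster_map aspect_freq_map
instance (asp_to_cluster_map : List (String × Int)) (aspect_freq_map : List (String × Int)) (out : List (Int × List (String × Int))) : Decidable (Spec_get_cluster_names_map asp_to_cluster_map aspect_freq_map out) := by unfold Spec_get_cluster_names_map; infer_instance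

-- ===== CLAIM (what is proved, stated in full; the proofs are below) =====
def Claim_equal_get_cluster_names_map : Prop := ∀ (asp_to_cluster_map : List (String × Int)) (aspect_freq_map : List (String × Int)), Dom_get_cluster_names_map asp_to_cluster_map aspect_freq_map → Spec_get_cluster_names_map asp_to_cluster_map aspect_freq_map (get_cluster_names_map asp_to_cluster_map aspect_freq_map)

-- ===== LEMMAS AND PROOFS =====

-- first match in a keyed map over distinct-producing keys
theorem pv_find?_map_pair {β : Type} (C : List Int) (u : Int → β) (c0 : Int) (h : c0 ∈ C) :
    List.find? (fun p => p.1 == c0) (C.map (fun c => (c, u c))) = some (c0, u c0) := by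
  induction C with
  | nil => cases h
  | cons y t ih =>
    simp only [List.map_cons, List.find?_cons]
    by_cases hy : y = c0
    · subst hy; simp
    · have hb : ((y, u y).1 == c0) = false := by simp [hy]
      rw [hb]
      exact ih ((List.mem_cons.mp h).resolve_left (fun e => hy e.symm))

theorem pv_items_ofList {ν : Type} (L : List (String × ν)) (h : (L.map Prod.fst).Nodup) :
    (PySem.Dict.ofList L).items = L := by
  have := PySem.Dict.items_foldl_insert_fresh L (fun p => p.1) (fun p => p.2) PySem.Dict.empty
    (fun a _ => PySem.Dict.contains_empty _) h
  simpa [PySem.Dict.ofList, PySem.Dict.update] using this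

theorem pv_ofList_const_items (xs : List Int) :
    (PySem.Dict.ofList (xs.map (fun x => (x, ([] : List (String × Int)))))).items
      = (PySem.Set.ofList xs).map (fun x => (x, [])) := by
  rw [PySem.Set.ofList_eq_foldl]
  show (List.foldl (fun acc p => acc.insert p.1 p.2) PySem.Dict.empty (xs.map (fun x => (x, [])))).items = _
  rw [List.foldl_map]
  have key : ∀ (s : PySem.Set Int) (d : PySem.Dict Int (List (String × Int))),
      d.items = s.map (fun x => (x, [])) →
      (List.foldl (fun acc x => acc.insert x []) d xs).items
        = (List.foldl PySem.Set.add s xs).map (fun x => (x, [])) := by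
    induction xs with
    | nil => intro s d hd; simpa using hd
    | cons x t ih =>
      intro s d hd
      simp only [List.foldl_cons]
      by_cases hx : x ∈ s
      · have hc : d.contains x = true := by
          simp only [PySem.Dict.contains, hd, List.any_map]
          exact List.any_eq_true.mpr ⟨x, hx, by simp⟩
        rw [PySem.Set.add_of_mem hx]
        apply ih s
        rw [PySem.Dict.items_insert_of_contains d [] hc, hd, List.map_map]
        apply List.map_congr_left
        intro a _
        by_cases hax : a = x <;> simp [hax]
      · have hc : d.contains x = false := by
          simp only [PySem.Dict.contains, hd, List.any_map]
          simp only [List.any_eq_false]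
          intro a ha
          by_cases hax : a = x
          · exact absurd (hax ▸ ha) hx
          · simp [hax]
        rw [PySem.Set.add_of_not_mem hx]
        apply ih (s ++ [x])
        rw [PySem.Dict.items_insert_of_not_contains d [] hc, hd, List.map_append]
        simp
  exact key [] PySem.Dict.empty (by simp [PySem.Dict.empty])

theorem pv_loop_items (d1 : PySem.Dict String Int) (l : List (String × Int)) :
    ∀ (C : List Int) (u : Int → List (String × Int)),
      (∀ k c, d1.get? k = some c → c ∈ C) →
      (l.foldl (pvBstep d1) (PySem.Dict.mk (C.map (fun c => (c, u c))))).items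
        = C.map (fun c => (c, u c ++ l.filter (fun p => d1.get? p.1 == some c))) := by
  induction l with
  | nil => intro C u _; simp
  | cons p t ih =>
    intro C u hmem
    simp only [List.foldl_cons]
    cases hg : d1.get? p.1 with
    | none =>
      have hstep : pvBstep d1 (PySem.Dict.mk (C.map (fun c => (c, u c)))) p
          = PySem.Dict.mk (C.map (fun c => (c, u c))) := by
        simp [pvBstep, hg]
      rw [hstep, ih C u hmem]
      apply List.map_congr_left
      intro c _
      simp [List.filter_cons, hg]
    | some c0 =>
      have hc0 : c0 ∈ C := hmem _ _ hg
      have hfind : List.find? (fun q => q.1 == c0) (C.map (fun c => (c, u c))) = some (c0, u c0) :=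
        pv_find?_map_pair C u c0 hc0
      have hgetD : (PySem.Dict.mk (C.map (fun c => (c, u c)))).getD c0 [] = u c0 := by
        simp [PySem.Dict.getD, PySem.Dict.get?, hfind]
      have hcont : (PySem.Dict.mk (C.map (fun c => (c, u c)))).contains c0 = true := by
        simp only [PySem.Dict.contains]
        exact List.any_eq_true.mpr ⟨(c0, u c0), List.mem_map.mpr ⟨c0, hc0, rfl⟩, by simp⟩
      have hstep : pvBstep d1 (PySem.Dict.mk (C.map (fun c => (c, u c)))) p
          = PySem.Dict.mk (C.map (fun c => (c, if c = c0 then u c0 ++ [p] else u c))) := by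
        apply PySem.Dict.ext
        simp only [pvBstep, hg, PySem.Dict.modify, hgetD]
        rw [PySem.Dict.items_insert_of_contains _ _ hcont]
        simp only [PySem.Dict.items, List.map_map]
        apply List.map_congr_left
        intro a _
        by_cases hax : a = c0 <;> simp [hax]
      rw [hstep, ih C _ hmem]
      apply List.map_congr_left
      intro c _
      by_cases hcc : c = c0
      · subst hcc; simp [List.filter_cons, hg]
      · have : (some c0 == some c) = false := by
          simp only [beq_eq_false_iff_ne, ne_eq, Option.some.injEq]
          exact fun e => hcc e.symm
        simp [List.filter_cons, hg, hcc, this]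

theorem pv_pred_eq (d1 : PySem.Dict String Int) (hnd : d1.keys.Nodup) (c : Int) (k : String) :
    ((d1.items.filter (fun kv => kv.2 == c)).map (fun kv => kv.1)).contains k
      = (d1.get? k == some c) := by
  by_cases hmem : k ∈ (d1.items.filter (fun kv => kv.2 == c)).map (fun kv => kv.1)
  · obtain ⟨kv, hkv, hk1⟩ := List.mem_map.mp hmem
    have hf := List.mem_filter.mp hkv
    have hv : kv.2 = c := by simpa using hf.2
    have hkvm : (k, c) ∈ d1.items := by
      have : kv = (k, c) := by rw [← hk1, ← hv]
      exact this ▸ hf.1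
    have hget : d1.get? k = some c := PySem.Dict.get?_of_mem_items d1 hkvm hnd
    have h1 : ((d1.items.filter (fun kv => kv.2 == c)).map (fun kv => kv.1)).contains k = true := by
      simpa using hmem
    rw [h1, hget]
    simp
  · have hget : d1.get? k ≠ some c := by
      intro hg
      exact hmem (List.mem_map.mpr ⟨(k, c), List.mem_filter.mpr
        ⟨PySem.Dict.mem_items_of_get?_eq_some d1 hg, by simp⟩, rfl⟩)
    have h1 : ((d1.items.filter (fun kv => kv.2 == c)).map (fun kv => kv.1)).contains k = false := by
      simpa using hmem
    have h2 : (d1.get? k == some c) = false := by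
      simpa using hget
    rw [h1, h2]

theorem pv_Aval_eq (d1 d2 : PySem.Dict String Int) (hnd1 : d1.keys.Nodup) (hnd2 : d2.keys.Nodup) (c : Int) :
    pvAval d1 d2 c
      = PySem.List.sorted (d2.items.filter (fun p => d1.get? p.1 == some c)) (fun x => x.2) true := by
  unfold pvAval
  have hpred : (fun kv : String × Int =>
      ((d1.items.filter (fun kv => kv.2 == c)).map (fun kv => kv.1)).contains kv.1)
      = (fun p : String × Int => d1.get? p.1 == some c) := by
    funext kv; exact pv_pred_eq d1 hnd1 c kv.1
  simp only [hpred]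
  congr 1
  apply pv_items_ofList
  exact List.Nodup.sublist (List.Sublist.map _ List.filter_sublist) hnd2

-- A = B: both list the clusters in first-occurrence order with equal per-cluster lists
theorem pv_main (m f : List (String × Int)) :
    get_cluster_names_map m f = get_cluster_names_map_alt m f := by
  simp only [get_cluster_names_map, get_cluster_names_map_alt]
  set d1 : PySem.Dict String Int := PySem.Dict.ofList m with hd1
  set d2 : PySem.Dict String Int := PySem.Dict.ofList f with hd2
  have hnd1 : d1.keys.Nodup := PySem.Dict.nodup_keys_ofList m
  have hnd2 : d2.keys.Nodup := PySem.Dict.nodup_keys_ofList f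
  set C : List Int := PySem.Set.ofList d1.values with hC
  have hCnd : C.Nodup := hC ▸ PySem.Set.nodup_ofList d1.values
  have hA : (C.foldl (fun (acc : PySem.Dict Int (List (String × Int))) i =>
      acc.insert i (pvAval d1 d2 i)) PySem.Dict.empty).items
      = C.map (fun i => (i, pvAval d1 d2 i)) := by
    have := PySem.Dict.items_foldl_insert_fresh C (fun i => i) (fun i => pvAval d1 d2 i)
      PySem.Dict.empty (fun a _ => PySem.Dict.contains_empty _) (by simpa using hCnd)
    simpa using this
  have hb0 : PySem.Dict.ofList (d1.values.map (fun cid => (cid, ([] : List (String × Int)))))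
      = PySem.Dict.mk (C.map (fun c => (c, []))) := by
    apply PySem.Dict.ext
    simpa using pv_ofList_const_items d1.values
  have hmem : ∀ k c, d1.get? k = some c → c ∈ C := by
    intro k c hg
    have hi : (k, c) ∈ d1.items := PySem.Dict.mem_items_of_get?_eq_some d1 hg
    have hv : c ∈ d1.values := List.mem_map.mpr ⟨(k, c), hi, rfl⟩
    exact hC ▸ (PySem.Set.mem_ofList d1.values c).mpr hv
  have hB := pv_loop_items d1 d2.items C (fun _ => []) hmem
  rw [hA, hb0, hB, List.map_map]
  apply List.map_congr_left
  intro c _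
  simp [pv_Aval_eq d1 d2 hnd1 hnd2 c]

-- ===== VERDICT (by name: the statement is the Claim_ definition above) =====
theorem get_cluster_names_map_spec : Claim_equal_get_cluster_names_map := by
  intro m f _
  unfold Spec_get_cluster_names_map
  exact pv_main m f
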